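-- pv_equiv track=rewrite | github.com/odoo/odoo | odoo/tools/barcode.py | datamatrix_encode_ascii
-- ===== SOURCE A (Python) =====
-- def datamatrix_encode_ascii(value):
--     """Encode ASCII data in a list of integer of ASCII value + 1.
--     Digit pairs are encoded as 130 + numeric value.
--     https://en.wikipedia.org/wiki/Data_Matrix#Encoding
--     https://www.icao.int/publications/Documents/9303_p13_cons_en.pdf
--
--     :param str value: the value to encode
--     :yield int: encoded codeword
--     """
--     i = 0
--     while i < len(value):
--         c = value[i]
--         if c.isdigit() and i + 1 < len(value) and value[i + 1].isdigit():
--             yield 130 + int(value[i : i + 2])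
--             i += 2
--         else:
--             yield ord(c) + 1
--             i += 1
-- ===== SOURCE B (Python) =====
-- import re
--
-- def datamatrix_encode_ascii(value):
--     """Regex-tokenized re-implementation: r'\d\d|.' (DOTALL) greedily takes two
--     consecutive digits, else one character; each token maps to its codeword."""
--     for tok in re.findall(r'\d\d|.', value, re.DOTALL):
--         if len(tok) == 2:
--             yield 130 + int(tok)
--         else:
--             yield ord(tok) + 1
-- ===== Notes on version B (the rewrite author's own statement) =====
-- stated objective: idiomatic
-- what changed: Replaced the manual index loop with variable step (i += 1 or 2) by a greedy regex tokenization re.findall(r'\d\d|.', value, re.DOTALL) followed by a single pass mapping each token to its codeword.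
import Mathlib
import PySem

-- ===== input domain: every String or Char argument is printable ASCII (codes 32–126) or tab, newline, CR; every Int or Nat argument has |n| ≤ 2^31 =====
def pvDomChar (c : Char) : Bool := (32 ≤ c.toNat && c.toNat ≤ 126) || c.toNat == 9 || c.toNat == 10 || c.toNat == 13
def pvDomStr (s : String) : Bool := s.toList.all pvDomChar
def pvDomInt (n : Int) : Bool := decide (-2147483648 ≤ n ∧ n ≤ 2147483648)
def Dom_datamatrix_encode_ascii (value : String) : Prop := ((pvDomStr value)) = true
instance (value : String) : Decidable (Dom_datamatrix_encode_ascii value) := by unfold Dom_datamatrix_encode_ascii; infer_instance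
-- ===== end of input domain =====

-- B replaces A's manual index loop (step 1 or 2) by a greedy regex tokenization
-- (two consecutive digits, else one character) and a single mapping pass; same
-- output, same cost (objective: idiomatic).

-- ===== PORT A =====
-- index loop: while i < len(value): look at value[i] (and value[i+1] if it exists).
-- `getD _ ' '` is only read when the index is in range (guarded), so it is exact;
-- value[i:i+2] with i+1 < len is exactly [value[i], value[i+1]] = (drop i).take 2.
def pvGoA (cs : List Char) (i : Nat) : List Int :=
  if i < cs.length then
    let c := cs.getD i ' '
    if PySem.Chars.isdigit c && decide (i + 1 < cs.length)
        && PySem.Chars.isdigit (cs.getD (i + 1) ' ') then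
      (130 + (PySem.Int.ofChars? ((cs.drop i).take 2)).getD 0) :: pvGoA cs (i + 2)
    else
      ((c.toNat : Int) + 1) :: pvGoA cs (i + 1)
  else []
termination_by cs.length - i
decreasing_by all_goals omega

def datamatrix_encode_ascii (value : String) : List Int := pvGoA value.toList 0

-- ===== PORT B =====
-- greedy tokenization of re.findall(r'\d\d|.', value, re.DOTALL): take two chars
-- when both match \d (on the ASCII domain, \d = PySem.Chars.isdigit), else one.
def pvGoB : List Char → List Int
  | [] => []
  | [a] => [(a.toNat : Int) + 1]
  | a :: b :: rest =>
    if PySem.Chars.isdigit a && PySem.Chars.isdigit b then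
      (130 + (PySem.Int.ofChars? [a, b]).getD 0) :: pvGoB rest
    else
      ((a.toNat : Int) + 1) :: pvGoB (b :: rest)

def datamatrix_encode_ascii_alt (value : String) : List Int := pvGoB value.toList

-- ===== PRECONDITION & SPEC =====
def Spec_datamatrix_encode_ascii (value : String) (out : List Int) : Prop := out = datamatrix_encode_ascii_alt value
instance (value : String) (out : List Int) : Decidable (Spec_datamatrix_encode_ascii value out) := by unfold Spec_datamatrix_encode_ascii; infer_instance

-- ===== CLAIM (what is proved, stated in full; the proofs are below) =====
def Claim_equal_datamatrix_encode_ascii : Prop := ∀ (value : String), Dom_datamatrix_encode_ascii value → Spec_datamatrix_encode_ascii value (datamatrix_encode_ascii value)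

-- ===== LEMMAS AND PROOFS =====
theorem pvGoA_eq_pvGoB (cs : List Char) (i : Nat) : pvGoA cs i = pvGoB (cs.drop i) := by
  induction i using pvGoA.induct (cs := cs) with
  | case1 i hlt c hdig ih =>
    have h1 : i + 1 < cs.length := by
      rcases Bool.and_eq_true_iff.mp hdig with ⟨h, _⟩
      rcases Bool.and_eq_true_iff.mp h with ⟨_, h2⟩
      exact of_decide_eq_true h2
    have hda : PySem.Chars.isdigit cs[i] = true := by
      rcases Bool.and_eq_true_iff.mp hdig with ⟨h, _⟩
      rcases Bool.and_eq_true_iff.mp h with ⟨ha, _⟩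
      simpa [c, List.getD_eq_getElem?_getD, hlt] using ha
    have hdb : PySem.Chars.isdigit cs[i + 1] = true := by
      rcases Bool.and_eq_true_iff.mp hdig with ⟨_, hb⟩
      simpa [List.getD_eq_getElem?_getD, h1] using hb
    have hdrop : cs.drop i = cs[i] :: cs[i + 1] :: cs.drop (i + 2) := by
      rw [List.drop_eq_getElem_cons hlt, List.drop_eq_getElem_cons h1]
    rw [pvGoA, if_pos hlt, if_pos hdig, hdrop]
    simp only [pvGoB, hda, hdb, Bool.and_self, if_pos, List.take_succ_cons, List.take_zero]
    exact congrArg _ ih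
  | case2 i hlt c hdig ih =>
    have hgd : cs.getD i ' ' = cs[i] := by
      simp [List.getD_eq_getElem?_getD, hlt]
    rw [pvGoA, if_pos hlt, if_neg hdig, List.drop_eq_getElem_cons hlt]
    by_cases h1 : i + 1 < cs.length
    · have hdrop : cs.drop (i + 1) = cs[i + 1] :: cs.drop (i + 2) :=
        List.drop_eq_getElem_cons h1
      rw [hdrop] at ih ⊢
      have hnot : ¬ (PySem.Chars.isdigit cs[i] && PySem.Chars.isdigit cs[i + 1]) = true := by
        intro hc
        rcases Bool.and_eq_true_iff.mp hc with ⟨ha, hb⟩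
        exact hdig (by simp [c, ha, hb, h1, hlt, List.getD_eq_getElem?_getD])
      simp only [pvGoB, if_neg hnot]
      rw [hgd, ih]
    · have hnil : cs.drop (i + 1) = [] := List.drop_eq_nil_of_le (by omega)
      rw [hnil] at ih ⊢
      simp only [pvGoB]
      rw [hgd, ih, pvGoB]
  | case3 i hlt =>
    rw [pvGoA, if_neg hlt, List.drop_eq_nil_of_le (by omega), pvGoB]

-- ===== VERDICT (by name: the statement is the Claim_ definition above) =====
theorem datamatrix_encode_ascii_spec : Claim_equal_datamatrix_encode_ascii := by
  intro value _
  unfold Spec_datamatrix_encode_ascii datamatrix_encode_ascii datamatrix_encode_ascii_alt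
  simpa using pvGoA_eq_pvGoB value.toList 0
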